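-- pv_equiv track=rewrite | github.com/propertools/crowsong | tools/cmudict/cmudict.py | build_bins
-- ===== SOURCE A (Python) =====
-- def _syllable_count(phones):
--     """
--     Count syllables in a phoneme list.
--     Syllable count = number of phonemes ending in a digit (vowel nuclei).
--     """
--     return sum(1 for p in phones if p[-1].isdigit())
--
-- def build_bins(cmudict):
--     """
--     Group all words by syllable count (primary pronunciation only).
--
--     Words with zero syllables (e.g. abbreviations without vowels) are
--     excluded. Words within each bin are alphabetically sorted, giving
--     downstream tools a stable, reproducible index.
--
--     Returns:
--         dict: syllable_count (int) -> sorted list of words (lowercase)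
--     """
--     bins = {}
--     for word, pronunciations in cmudict.items():
--         if not pronunciations:
--             continue
--         n = _syllable_count(pronunciations[0])
--         if n < 1:
--             continue
--         if n not in bins:
--             bins[n] = []
--         bins[n].append(word)
--     for n in bins:
--         bins[n].sort()
--     return bins
-- ===== SOURCE B (Python) =====
-- def _syllable_count(phones):
--     """
--     Count syllables in a phoneme list.
--     Syllable count = number of phonemes ending in a digit (vowel nuclei).
--     """
--     return sum(1 for p in phones if p[-1].isdigit())
--
-- def build_bins(cmudict):
--     """
--     Group all words by syllable count (primary pronunciation only).
--
--     One pass records each word's syllable count and creates its (empty)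
--     bin; then the words are sorted ONCE globally and distributed into
--     their bins in that order, so every bin comes out alphabetical with
--     no per-bin sorting.
--     """
--     counts = {}
--     bins = {}
--     for word, pronunciations in cmudict.items():
--         if not pronunciations:
--             continue
--         n = _syllable_count(pronunciations[0])
--         if n < 1:
--             continue
--         counts[word] = n
--         bins.setdefault(n, [])
--     for word in sorted(counts):
--         bins[counts[word]].append(word)
--     return bins
-- ===== Notes on version B (the rewrite author's own statement) =====
-- stated objective: alternative
-- what changed: A groups words into bins and then sorts every bin separately; B records each word's syllable count and its bin in one pass, sorts the word list ONCE globally, and distributes the words into their bins in that order, so no per-bin sort is needed.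
import Mathlib
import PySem

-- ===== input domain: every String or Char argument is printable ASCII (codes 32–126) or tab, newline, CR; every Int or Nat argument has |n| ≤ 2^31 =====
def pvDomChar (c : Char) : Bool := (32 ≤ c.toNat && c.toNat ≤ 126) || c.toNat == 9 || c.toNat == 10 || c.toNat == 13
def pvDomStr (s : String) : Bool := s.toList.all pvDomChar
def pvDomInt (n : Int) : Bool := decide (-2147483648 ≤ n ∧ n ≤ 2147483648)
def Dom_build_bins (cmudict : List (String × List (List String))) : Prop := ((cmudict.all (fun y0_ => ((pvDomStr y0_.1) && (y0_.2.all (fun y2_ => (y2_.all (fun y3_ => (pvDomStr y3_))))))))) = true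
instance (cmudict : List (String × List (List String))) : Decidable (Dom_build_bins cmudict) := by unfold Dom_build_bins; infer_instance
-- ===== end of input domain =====

-- B replaces A's group-then-sort-each-bin by: one pass recording each word's syllable count
-- and creating its bin, ONE global sort of the words, then a distribution pass (alternative decomposition).


-- ===== PORT A =====
-- _syllable_count: sum(1 for p in phones if p[-1].isdigit()); p[-1] on an empty
-- phoneme raises IndexError in Python (excluded by Pre_), here the `none` branch.
def sylCount (phones : List String) : Int :=
  phones.foldl
    (fun acc p =>
      if (match PySem.Str.pyGet? p (-1) with
          | some c => PySem.Str.isdigit c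
          | none => false) then acc + 1 else acc) 0

def build_bins (cmudict : List (String × List (List String))) : List (Int × List String) :=
  let bins :=
    cmudict.foldl
      (fun (bins : PySem.Dict Int (List String)) wp =>
        if wp.2 = [] then bins       -- if not pronunciations: continue
        else
          let n := sylCount (wp.2.headD [])   -- pronunciations[0] (nonempty here)
          if n < 1 then bins         -- if n < 1: continue
          else
            let bins := if bins.contains n then bins else bins.insert n ([] : List String)
            bins.modify n [] (fun l => l ++ [wp.1]))   -- bins[n].append(word)
      PySem.Dict.empty
  -- for n in bins: bins[n].sort()   (each value replaced in place by its sorted self)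
  bins.items.map (fun p => (p.1, PySem.List.sorted p.2 (fun w => w) false))

-- ===== PORT B =====
def build_bins_alt (cmudict : List (String × List (List String))) : List (Int × List String) :=
  let st :=
    cmudict.foldl
      (fun (st : PySem.Dict String Int × PySem.Dict Int (List String)) wp =>
        if wp.2 = [] then st         -- if not pronunciations: continue
        else
          let n := sylCount (wp.2.headD [])   -- pronunciations[0] (nonempty here)
          if n < 1 then st           -- if n < 1: continue
          else (st.1.insert wp.1 n, st.2.setdefault n []))  -- counts[word] = n; bins.setdefault(n, [])
      (PySem.Dict.empty, PySem.Dict.empty)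
  let counts := st.1
  -- for word in sorted(counts): bins[counts[word]].append(word)
  -- counts[word] always succeeds (word was just inserted), so getD is exact here
  let bins :=
    (PySem.List.sorted counts.keys (fun w => w) false).foldl
      (fun bins w => bins.modify (counts.getD w 0) [] (fun l => l ++ [w])) st.2
  bins.items

-- ===== PRECONDITION & SPEC =====
-- Pre_ excludes (a) assoc lists with duplicate word keys, which do not arise from a
-- Python dict argument, and (b) inputs holding an empty phoneme string in a used first
-- pronunciation, on which Python A raises IndexError (p[-1]).
def Pre_build_bins (cmudict : List (String × List (List String))) : Prop :=
  (cmudict.map (·.1)).Nodup ∧ ∀ wp ∈ cmudict, ∀ ph ∈ wp.2.headD [], ph ≠ ""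
instance (cmudict : List (String × List (List String))) : Decidable (Pre_build_bins cmudict) := by unfold Pre_build_bins; infer_instance
def pvWitness_build_bins : (List (String × List (List String))) :=
  [("cat", [["K", "AE1", "T"]]), ("tiger", [["T", "AY1", "G", "ER0"]])]
def Spec_build_bins (cmudict : List (String × List (List String))) (out : List (Int × List String)) : Prop := out = build_bins_alt cmudict
instance (cmudict : List (String × List (List String))) (out : List (Int × List String)) : Decidable (Spec_build_bins cmudict out) := by unfold Spec_build_bins; infer_instance

-- ===== CLAIM (what is proved, stated in full; the proofs are below) =====
def Claim_equal_build_bins : Prop := ∀ (cmudict : List (String × List (List String))), Dom_build_bins cmudict → Pre_build_bins cmudict → Spec_build_bins cmudict (build_bins cmudict)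

-- ===== LEMMAS AND PROOFS =====

-- the entries both programs keep, and their syllable counts
def pvOk (wp : String × List (List String)) : Bool :=
  !decide (wp.2 = []) && !decide (sylCount (wp.2.headD []) < 1)
def pvValid (cm : List (String × List (List String))) : List (String × List (List String)) :=
  cm.filter pvOk
def pvN (wp : String × List (List String)) : Int := sylCount (wp.2.headD [])
def pvLA (cm : List (String × List (List String))) : List (Int × String) :=
  (pvValid cm).map (fun wp => (pvN wp, wp.1))
-- the words of l carrying count k, in order
def selW (k : Int) (l : List (Int × String)) : List String :=
  (l.filter (fun p => p.1 == k)).map (·.2)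
-- the bins created by scanning l, keys not already in `seen`, keyed in first-occurrence order
def newBins : List (Int × String) → List Int → List (Int × List String)
  | [], _ => []
  | (k, w) :: t, seen =>
      if k ∈ seen then newBins t seen
      else (k, w :: selW k t) :: newBins t (k :: seen)

theorem selW_cons (k k' : Int) (w : String) (t : List (Int × String)) :
    selW k ((k', w) :: t) = if k' == k then w :: selW k t else selW k t := by
  by_cases h : k' == k <;> simp [selW, h]

theorem foldl_guard {σ : Type} (g : σ → (String × List (List String)) → σ) :
    ∀ (cm : List (String × List (List String))) (s : σ),
      cm.foldl
        (fun s wp =>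
          if wp.2 = [] then s
          else if sylCount (wp.2.headD []) < 1 then s else g s wp) s
      = (pvValid cm).foldl g s := by
  intro cm
  induction cm with
  | nil => intro s; rfl
  | cons wp t ih =>
      intro s
      rw [List.foldl_cons]
      by_cases h1 : wp.2 = []
      · have hok : pvOk wp = false := by unfold pvOk; rw [decide_eq_true h1]; simp
        simp only [if_pos h1, ih, pvValid, List.filter_cons, hok]
        rfl
      · by_cases h2 : sylCount (wp.2.headD []) < 1
        · have hok : pvOk wp = false := by unfold pvOk; rw [decide_eq_true h2]; simp
          simp only [if_neg h1, if_pos h2, ih, pvValid, List.filter_cons, hok]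
          rfl
        · have hok : pvOk wp = true := by
            unfold pvOk; rw [decide_eq_false h1, decide_eq_false h2]; simp
          simp only [if_neg h1, if_neg h2, ih, pvValid, List.filter_cons, hok]
          rfl

theorem newBins_seen_congr (l : List (Int × String)) :
    ∀ s1 s2 : List Int, (∀ x, x ∈ s1 ↔ x ∈ s2) → newBins l s1 = newBins l s2 := by
  induction l with
  | nil => intro _ _ _; rfl
  | cons p t ih =>
      intro s1 s2 h
      obtain ⟨k, w⟩ := p
      by_cases hk : k ∈ s1
      · simp [newBins, hk, (h k).mp hk, ih s1 s2 h]
      · have hk2 : k ∉ s2 := fun hc => hk ((h k).mpr hc)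
        simp only [newBins, if_neg hk, if_neg hk2]
        rw [ih (k :: s1) (k :: s2) (by intro x; simp [h x])]

theorem newBins_mem_snd (l : List (Int × String)) :
    ∀ (seen : List Int) (p : Int × List String), p ∈ newBins l seen →
      p.1 ∉ seen ∧ p.2 = selW p.1 l := by
  induction l with
  | nil => intro _ _ h; simp [newBins] at h
  | cons q t ih =>
      intro seen p hp
      obtain ⟨k, w⟩ := q
      by_cases hk : k ∈ seen
      · simp only [newBins, if_pos hk] at hp
        obtain ⟨h1, h2⟩ := ih seen p hp
        refine ⟨h1, ?_⟩
        rw [selW_cons, if_neg, h2]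
        simp only [beq_iff_eq]
        intro he; exact h1 (he ▸ hk)
      · simp only [newBins, if_neg hk, List.mem_cons] at hp
        rcases hp with hp | hp
        · subst hp
          refine ⟨hk, ?_⟩
          simp [selW_cons]
        · obtain ⟨h1, h2⟩ := ih (k :: seen) p hp
          simp only [List.mem_cons, not_or] at h1
          refine ⟨h1.2, ?_⟩
          rw [selW_cons, if_neg, h2]
          simp only [beq_iff_eq]
          intro he; exact h1.1 he.symm

theorem newBins_keys_nodup (l : List (Int × String)) :
    ∀ seen : List Int, ((newBins l seen).map (·.1)).Nodup := by
  induction l with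
  | nil => intro _; simp [newBins]
  | cons q t ih =>
      intro seen
      obtain ⟨k, w⟩ := q
      by_cases hk : k ∈ seen
      · simpa [newBins, hk] using ih seen
      · simp only [newBins, if_neg hk, List.map_cons, List.nodup_cons]
        refine ⟨?_, ih (k :: seen)⟩
        intro hmem
        obtain ⟨p, hp, hpk⟩ := List.mem_map.mp hmem
        have := (newBins_mem_snd t (k :: seen) p hp).1
        simp only [List.mem_cons, not_or] at this
        exact this.1 hpk

theorem mem_newBins_fst (l : List (Int × String)) :
    ∀ (seen : List Int) (x : Int),
      x ∈ (newBins l seen).map (·.1) ↔ (x ∈ l.map (·.1) ∧ x ∉ seen) := by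
  induction l with
  | nil => intro _ _; simp [newBins]
  | cons q t ih =>
      intro seen x
      obtain ⟨k, w⟩ := q
      by_cases hk : k ∈ seen
      · by_cases hx : x = k
        · subst hx; simp [newBins, hk, ih]
        · simp [newBins, hk, ih, hx]
      · by_cases hx : x = k
        · subst hx; simp [newBins, hk]
        · simp [newBins, hk, ih, hx]

theorem newBins_nil_of_sub (l : List (Int × String)) :
    ∀ seen : List Int, (∀ p ∈ l, p.1 ∈ seen) → newBins l seen = [] := by
  induction l with
  | nil => intro _ _; rfl
  | cons q t ih =>
      intro seen h
      obtain ⟨k, w⟩ := q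
      have hk : k ∈ seen := h (k, w) (List.mem_cons_self)
      simp only [newBins, if_pos hk]
      exact ih seen (fun p hp => h p (List.mem_cons_of_mem _ hp))

-- get? of an appended fresh key
theorem get?_append_fresh (n : Int) (v : List String) :
    ∀ items : List (Int × List String), (items.any (fun p => p.1 == n)) = false →
      (PySem.Dict.mk (items ++ [(n, v)]) : PySem.Dict Int (List String)).get? n = some v := by
  intro items
  induction items with
  | nil => intro _; simp [PySem.Dict.get?_mk_cons]
  | cons q t ih =>
      intro h
      simp only [List.any_cons, Bool.or_eq_false_iff] at h
      rw [List.cons_append, PySem.Dict.get?_mk_cons, if_neg (by simp [h.1] : ¬(q.1 == n) = true)]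
      exact ih h.2

-- items of a dict with a fresh key appended, after modify at that key
theorem modify_items_not_contains (d : PySem.Dict Int (List String)) (n : Int)
    (w : String) (h : d.contains n = false) :
    (d.modify n [] (fun l => l ++ [w])).items = d.items ++ [(n, [w])] := by
  rw [PySem.Dict.modify, PySem.Dict.getD_of_not_contains d ([] : List String) h,
    PySem.Dict.items_insert, if_neg (by simp [h])]
  simp

theorem modify_items_contains (d : PySem.Dict Int (List String)) (n : Int)
    (w : String) (h : d.contains n = true) (hnd : d.keys.Nodup) :
    (d.modify n [] (fun l => l ++ [w])).items
      = d.items.map (fun q => if q.1 == n then (q.1, q.2 ++ [w]) else q) := by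
  rw [PySem.Dict.modify, PySem.Dict.items_insert, if_pos h]
  apply List.map_congr_left
  intro q hq
  by_cases hqn : (q.1 == n) = true
  · have hq1 : q.1 = n := eq_of_beq hqn
    have hmem : (n, q.2) ∈ d.items := by rw [← hq1]; simpa using hq
    have hgd : d.getD n [] = q.2 := PySem.Dict.getD_of_mem_items d hmem hnd []
    simp [hq1, hgd]
  · simp [hqn]

-- A's "if n not in bins: bins[n] = []; bins[n].append(word)" is one modify
theorem stepA_eq (d : PySem.Dict Int (List String)) (n : Int) (w : String) :
    ((if d.contains n then d else d.insert n ([] : List String)).modify n []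
        (fun l => l ++ [w]))
      = d.modify n [] (fun l => l ++ [w]) := by
  by_cases hc : d.contains n = true
  · simp [hc]
  · simp only [Bool.not_eq_true] at hc
    rw [if_neg (by simp [hc])]
    have hc' : d.items.any (fun p => p.1 == n) = false := hc
    have hins : (d.insert n ([] : List String)).items = d.items ++ [(n, [])] := by
      simp [PySem.Dict.items_insert, hc]
    have hcon : (d.insert n ([] : List String)).contains n = true := by
      simp
    have hget : (d.insert n ([] : List String)).getD n [] = [] := by
      have hd' : (d.insert n ([] : List String))
          = (⟨d.items ++ [(n, [])]⟩ : PySem.Dict Int (List String)) := PySem.Dict.ext hins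
      rw [PySem.Dict.getD, hd', get?_append_fresh n [] d.items hc']
      rfl
    apply PySem.Dict.ext
    rw [modify_items_not_contains d n w hc]
    rw [PySem.Dict.modify, hget, PySem.Dict.items_insert, if_pos hcon, hins, List.map_append]
    have h1 : d.items.map (fun p => if (p.1 == n) = true then (n, [] ++ [w]) else p)
        = d.items := by
      have := List.map_congr_left (f := fun p : Int × List String =>
          if (p.1 == n) = true then (n, [] ++ [w]) else p) (g := id)
        (fun q hq => by
          have hq' := List.any_eq_false.mp hc' q hq
          simp [hq'])
      rw [this, List.map_id]
    rw [h1]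
    simp

-- the modify-fold, characterised
theorem mf_items (l : List (Int × String)) :
    ∀ d : PySem.Dict Int (List String), d.keys.Nodup →
      (l.foldl (fun d p => d.modify p.1 [] (fun xs => xs ++ [p.2])) d).items
        = d.items.map (fun q => (q.1, q.2 ++ selW q.1 l)) ++ newBins l d.keys := by
  induction l with
  | nil => intro d _; simp [newBins, selW]
  | cons p t ih =>
      intro d hnd
      obtain ⟨k, w⟩ := p
      rw [List.foldl_cons]
      by_cases hc : d.contains k = true
      · have hkmem : k ∈ d.keys := (PySem.Dict.contains_iff_mem_keys d k).mp hc
        have hkeys : (d.modify k [] (fun l => l ++ [w])).keys = d.keys := by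
          rw [PySem.Dict.keys_modify, PySem.Dict.keys_insert_of_contains d _ hc]
        rw [ih _ (hkeys ▸ hnd), hkeys, modify_items_contains d k w hc hnd, List.map_map]
        have hmap : ∀ q ∈ d.items,
            ((fun q : Int × List String => (q.1, q.2 ++ selW q.1 t)) ∘
              (fun q : Int × List String => if q.1 == k then (q.1, q.2 ++ [w]) else q)) q
              = (q.1, q.2 ++ selW q.1 ((k, w) :: t)) := by
          intro q _
          by_cases hqk : (q.1 == k) = true
          · have hq1 : q.1 = k := eq_of_beq hqk
            simp [Function.comp, selW_cons, hq1]
          · have hkq : (k == q.1) = false := by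
              simp only [beq_eq_false_iff_ne]
              intro he; exact hqk (by simp [he])
            simp [Function.comp, hqk, selW_cons, hkq]
        rw [List.map_congr_left hmap]
        simp only [newBins, if_pos hkmem]
      · have hknmem : k ∉ d.keys := fun hm =>
          by simp [(PySem.Dict.contains_iff_mem_keys d k).mpr hm] at hc
        have hitems : (d.modify k [] (fun l => l ++ [w])).items = d.items ++ [(k, [w])] :=
          modify_items_not_contains d k w (by simpa using hc)
        have hkeys : (d.modify k [] (fun l => l ++ [w])).keys = d.keys ++ [k] := by
          simp [PySem.Dict.keys, hitems]
        have hnd' : (d.keys ++ [k]).Nodup := by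
          rw [List.nodup_append]
          refine ⟨hnd, List.nodup_singleton k, ?_⟩
          intro a ha b hb
          simp only [List.mem_singleton] at hb
          subst hb
          intro he
          exact hknmem (he ▸ ha)
        rw [ih _ (hkeys ▸ hnd'), hkeys, hitems, List.map_append]
        have hmap : d.items.map (fun q : Int × List String => (q.1, q.2 ++ selW q.1 t))
            = d.items.map (fun q => (q.1, q.2 ++ selW q.1 ((k, w) :: t))) := by
          apply List.map_congr_left
          intro q hq
          have hqk : (k == q.1) = false := by
            simp only [beq_eq_false_iff_ne]
            intro he
            exact hknmem (he ▸ List.mem_map.mpr ⟨q, hq, rfl⟩)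
          rw [selW_cons, if_neg (by simp [hqk])]
        have hseen : newBins t (d.keys ++ [k]) = newBins t (k :: d.keys) :=
          newBins_seen_congr t _ _ (by intro x; simp; tauto)
        rw [hmap, hseen]
        simp only [newBins, if_neg hknmem]
        simp

-- the setdefault-fold, characterised
theorem sf_items (l : List (Int × String)) :
    ∀ d : PySem.Dict Int (List String),
      (l.foldl (fun d p => d.setdefault p.1 []) d).items
        = d.items ++ (newBins l d.keys).map (fun q => (q.1, ([] : List String))) := by
  induction l with
  | nil => intro d; simp [newBins]
  | cons p t ih =>
      intro d
      obtain ⟨k, w⟩ := p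
      rw [List.foldl_cons]
      by_cases hc : d.contains k = true
      · have hkmem : k ∈ d.keys := (PySem.Dict.contains_iff_mem_keys d k).mp hc
        rw [PySem.Dict.setdefault_of_contains d [] hc, ih d]
        simp only [newBins, if_pos hkmem]
      · have hknmem : k ∉ d.keys := fun hm =>
          by simp [(PySem.Dict.contains_iff_mem_keys d k).mpr hm] at hc
        have hc' : d.contains k = false := by simpa using hc
        rw [PySem.Dict.setdefault_of_not_contains d [] hc', ih _]
        have hitems : (d.insert k ([] : List String)).items = d.items ++ [(k, [])] := by
          simp [PySem.Dict.items_insert, hc']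
        have hkeys : (d.insert k ([] : List String)).keys = d.keys ++ [k] := by
          simp [PySem.Dict.keys, hitems]
        rw [hitems, hkeys,
          newBins_seen_congr t (d.keys ++ [k]) (k :: d.keys) (by intro x; simp; tauto)]
        simp [newBins, if_neg hknmem]

theorem foldl_pair {α β γ : Type} (l : List γ) (f : α → γ → α) (g : β → γ → β) :
    ∀ (a : α) (b : β),
      l.foldl (fun s x => (f s.1 x, g s.2 x)) (a, b) = (l.foldl f a, l.foldl g b) := by
  induction l with
  | nil => intro a b; rfl
  | cons x t ih => intro a b; simpa using ih (f a x) (g b x)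

theorem counts_items (cm : List (String × List (List String)))
    (hnd : ((pvValid cm).map (·.1)).Nodup) :
    ((pvValid cm).foldl (fun d wp => d.insert wp.1 (pvN wp)) PySem.Dict.empty).items
      = (pvValid cm).map (fun wp => (wp.1, pvN wp)) := by
  have h := PySem.Dict.items_foldl_insert_fresh (pvValid cm) (fun wp => wp.1)
    (fun wp => pvN wp) PySem.Dict.empty
    (fun a _ => PySem.Dict.contains_empty a.1) hnd
  simpa [PySem.Dict.empty] using h

theorem sorted_sel (cm : List (String × List (List String))) (c : String → Int)
    (hnd : ((pvValid cm).map (·.1)).Nodup)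
    (hc : ∀ wp ∈ pvValid cm, c wp.1 = pvN wp) (k : Int) :
    PySem.List.sorted (selW k (pvLA cm)) (fun w => w) false
      = (PySem.List.sorted ((pvValid cm).map (·.1)) (fun w => w) false).filter
          (fun w => c w == k) := by
  have hsel : selW k (pvLA cm) = ((pvValid cm).filter (fun wp => pvN wp == k)).map (·.1) := by
    simp [selW, pvLA, List.filter_map, List.map_map, Function.comp_def]
  have hfil : ((pvValid cm).map (·.1)).filter (fun w => c w == k)
      = ((pvValid cm).filter (fun wp => pvN wp == k)).map (·.1) := by
    rw [List.filter_map]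
    congr 1
    apply List.filter_congr
    intro wp hwp
    simp [Function.comp, hc wp hwp]
  have hperm0 := PySem.List.sorted_perm ((pvValid cm).map (·.1)) (fun w => w) false
  have hperm : ((PySem.List.sorted ((pvValid cm).map (·.1)) (fun w => w) false).filter
      (fun w => c w == k)).Perm (selW k (pvLA cm)) := by
    rw [hsel, ← hfil]
    exact hperm0.filter _
  have hnds : (PySem.List.sorted ((pvValid cm).map (·.1)) (fun w => w) false).Nodup :=
    (List.Perm.nodup_iff hperm0).mpr hnd
  have hle : (PySem.List.sorted ((pvValid cm).map (·.1)) (fun w => w) false).Pairwise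
      (· ≤ ·) := by
    simpa using PySem.List.sorted_pairwise ((pvValid cm).map (·.1)) (fun w => w)
  have hlt : (PySem.List.sorted ((pvValid cm).map (·.1)) (fun w => w) false).Pairwise
      (· < ·) := by
    have := List.Pairwise.and hle hnds
    exact this.imp (fun h => lt_of_le_of_ne h.1 h.2)
  exact PySem.List.sorted_eq_of_perm_of_pairwise_lt _ _ _ hperm (hlt.filter _)

-- ===== VERDICT (by name: the statement is the Claim_ definition above) =====
theorem build_bins_spec : Claim_equal_build_bins := by
  intro cm _hdom hpre
  unfold Spec_build_bins
  obtain ⟨hnodup, _hph⟩ := hpre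
  have hndv : ((pvValid cm).map (·.1)).Nodup :=
    List.Nodup.sublist (List.Sublist.map _ List.filter_sublist) hnodup
  -- B's counts dict
  have hci := counts_items cm hndv
  have hck : ((pvValid cm).foldl (fun d wp => d.insert wp.1 (pvN wp))
      PySem.Dict.empty).keys = (pvValid cm).map (·.1) := by
    simp [PySem.Dict.keys, hci, List.map_map, Function.comp_def]
  have hcgd : ∀ wp ∈ pvValid cm,
      ((pvValid cm).foldl (fun d wp => d.insert wp.1 (pvN wp))
        PySem.Dict.empty).getD wp.1 0 = pvN wp := by
    intro wp hwp
    exact PySem.Dict.getD_of_mem_items _ (by rw [hci]; exact List.mem_map.mpr ⟨wp, hwp, rfl⟩)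
      (by rw [hck]; exact hndv) 0
  -- ===== A reduced to newBins =====
  have hA : build_bins cm = (newBins (pvLA cm) []).map
      (fun p => (p.1, PySem.List.sorted p.2 (fun w => w) false)) := by
    have hz : build_bins cm =
        (cm.foldl
          (fun (bins : PySem.Dict Int (List String)) wp =>
            if wp.2 = [] then bins
            else if sylCount (wp.2.headD []) < 1 then bins
            else
              (if bins.contains (sylCount (wp.2.headD [])) then bins
               else bins.insert (sylCount (wp.2.headD [])) ([] : List String)).modify
                (sylCount (wp.2.headD [])) [] (fun l => l ++ [wp.1]))
          PySem.Dict.empty).items.map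
          (fun p => (p.1, PySem.List.sorted p.2 (fun w => w) false)) := rfl
    rw [hz, foldl_guard]
    simp only [stepA_eq]
    have hfm : (pvValid cm).foldl
        (fun (d : PySem.Dict Int (List String)) wp =>
          d.modify (sylCount (wp.2.headD [])) [] (fun l => l ++ [wp.1]))
        PySem.Dict.empty
        = (pvLA cm).foldl (fun d p => d.modify p.1 [] (fun xs => xs ++ [p.2]))
            PySem.Dict.empty := by
      rw [pvLA, List.foldl_map]
      rfl
    rw [hfm, mf_items (pvLA cm) PySem.Dict.empty (by simp [PySem.Dict.empty, PySem.Dict.keys])]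
    simp [PySem.Dict.empty, PySem.Dict.keys]
  -- ===== B reduced to newBins =====
  have hzB : build_bins_alt cm =
      ((PySem.List.sorted
          ((pvValid cm).foldl (fun d wp => d.insert wp.1 (pvN wp))
            PySem.Dict.empty).keys (fun w => w) false).foldl
        (fun bins w =>
          bins.modify
            (((pvValid cm).foldl (fun d wp => d.insert wp.1 (pvN wp))
              PySem.Dict.empty).getD w 0) [] (fun l => l ++ [w]))
        ((pvValid cm).foldl (fun (d : PySem.Dict Int (List String)) wp => d.setdefault (pvN wp) [])
          PySem.Dict.empty)).items := by
    have hz : build_bins_alt cm =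
        (let st := cm.foldl
            (fun (st : PySem.Dict String Int × PySem.Dict Int (List String)) wp =>
              if wp.2 = [] then st
              else if sylCount (wp.2.headD []) < 1 then st
              else (st.1.insert wp.1 (sylCount (wp.2.headD [])),
                    st.2.setdefault (sylCount (wp.2.headD [])) []))
            (PySem.Dict.empty, PySem.Dict.empty)
         ((PySem.List.sorted st.1.keys (fun w => w) false).foldl
            (fun bins w => bins.modify (st.1.getD w 0) [] (fun l => l ++ [w])) st.2).items) :=
      rfl
    rw [hz, foldl_guard, foldl_pair (pvValid cm)
      (fun (d : PySem.Dict String Int) wp => d.insert wp.1 (sylCount (wp.2.headD [])))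
      (fun (d : PySem.Dict Int (List String)) wp =>
        d.setdefault (sylCount (wp.2.headD [])) [])]
    rfl
  rw [hA, hzB]
  -- bins0 of B
  have hb0 : ((pvValid cm).foldl
        (fun (d : PySem.Dict Int (List String)) wp => d.setdefault (pvN wp) [])
      PySem.Dict.empty).items
      = (newBins (pvLA cm) []).map (fun q => (q.1, ([] : List String))) := by
    have hfmb : (pvValid cm).foldl
        (fun (d : PySem.Dict Int (List String)) wp => d.setdefault (pvN wp) [])
          PySem.Dict.empty
        = (pvLA cm).foldl
            (fun (d : PySem.Dict Int (List String)) p => d.setdefault p.1 [])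
            PySem.Dict.empty := by
      rw [pvLA, List.foldl_map]
    rw [hfmb, sf_items]
    simp [PySem.Dict.empty, PySem.Dict.keys]
  have hb0k : ((pvValid cm).foldl (fun (d : PySem.Dict Int (List String)) wp => d.setdefault (pvN wp) [])
      PySem.Dict.empty).keys = (newBins (pvLA cm) []).map (·.1) := by
    simp [PySem.Dict.keys, hb0, List.map_map, Function.comp_def]
  -- the distribution fold of B, as a pair fold
  have hfmB : (PySem.List.sorted
        ((pvValid cm).foldl (fun d wp => d.insert wp.1 (pvN wp))
          PySem.Dict.empty).keys (fun w => w) false).foldl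
      (fun bins w =>
        bins.modify
          (((pvValid cm).foldl (fun d wp => d.insert wp.1 (pvN wp))
            PySem.Dict.empty).getD w 0) [] (fun l => l ++ [w]))
      ((pvValid cm).foldl (fun (d : PySem.Dict Int (List String)) wp => d.setdefault (pvN wp) []) PySem.Dict.empty)
      = ((PySem.List.sorted ((pvValid cm).map (·.1)) (fun w => w) false).map
          (fun w =>
            (((pvValid cm).foldl (fun d wp => d.insert wp.1 (pvN wp))
              PySem.Dict.empty).getD w 0, w))).foldl
          (fun d p => d.modify p.1 [] (fun xs => xs ++ [p.2]))
          ((pvValid cm).foldl (fun (d : PySem.Dict Int (List String)) wp => d.setdefault (pvN wp) []) PySem.Dict.empty) := by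
    rw [List.foldl_map, hck]
  rw [hfmB, mf_items _ _ (by rw [hb0k]; exact newBins_keys_nodup _ [])]
  -- no new bins appear in the second pass
  have hnonew : newBins
      ((PySem.List.sorted ((pvValid cm).map (·.1)) (fun w => w) false).map
        (fun w =>
          (((pvValid cm).foldl (fun d wp => d.insert wp.1 (pvN wp))
            PySem.Dict.empty).getD w 0, w)))
      (((pvValid cm).foldl (fun (d : PySem.Dict Int (List String)) wp => d.setdefault (pvN wp) [])
        PySem.Dict.empty).keys) = [] := by
    apply newBins_nil_of_sub
    intro p hp
    obtain ⟨w, hw, rfl⟩ := List.mem_map.mp hp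
    have hw' : w ∈ (pvValid cm).map (·.1) := by
      rw [← PySem.List.mem_sorted ((pvValid cm).map (·.1)) (fun w => w) false]
      exact hw
    obtain ⟨wp, hwp, rfl⟩ := List.mem_map.mp hw'
    rw [hb0k, hcgd wp hwp]
    exact (mem_newBins_fst (pvLA cm) [] (pvN wp)).mpr
      ⟨List.mem_map.mpr ⟨(pvN wp, wp.1), List.mem_map.mpr ⟨wp, hwp, rfl⟩, rfl⟩, by simp⟩
  rw [hnonew, hb0, List.append_nil, List.map_map]
  apply List.map_congr_left
  intro p hp
  obtain ⟨_, hsnd⟩ := newBins_mem_snd (pvLA cm) [] p hp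
  have hkey := sorted_sel cm
    (fun w => ((pvValid cm).foldl (fun d wp => d.insert wp.1 (pvN wp))
      PySem.Dict.empty).getD w 0) hndv (fun wp hwp => hcgd wp hwp) p.1
  simp only [Function.comp_def, hsnd, hkey]
  simp [selW, List.filter_map, List.map_map, Function.comp_def]
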